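-- pv_equiv track=rewrite | github.com/wirelessdreamer/AbletonFullControlMCP | src/ableton_mcp/shaping/parser.py | _classify_intensity
-- ===== SOURCE A (Python) =====
-- _INTENSIFIERS_STRONG = {"much", "way", "very", "really", "lots", "tons"}
--
-- _INTENSIFIERS_WEAK = {"slightly", "little", "bit", "tad", "touch", "somewhat", "kinda", "kind"}
--
-- _LESS_WORDS = {"less", "reduce", "reduced", "fewer", "drop", "remove", "without", "no", "kill"}
--
-- _MORE_WORDS = {"more", "increase", "boost", "extra", "add", "enhance", "with"}
--
-- def _classify_intensity(window: list[str]) -> int: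
--     """Map a small window of preceding/surrounding words to {-2, -1, 0, +1, +2}.
--
--     Polarity (less/more) and strength (much/slightly) are independent.
--     """
--     polarity = +1  # default: an unmodified descriptor reads as "more X".
--     strong = False
--     weak = False
--     for w in window:
--         wl = w.lower()
--         if wl in _LESS_WORDS:
--             polarity = -1
--         elif wl in _MORE_WORDS:
--             polarity = +1
--         elif wl in _INTENSIFIERS_STRONG:
--             strong = True
--         elif wl in _INTENSIFIERS_WEAK:
--             weak = True
--     if strong:
--         return polarity * 2
--     if weak:
--         # Weak qualifier still means "a bit X" — keep magnitude 1, just with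
--         # the right polarity. (We don't have an "0.5" rung.)
--         return polarity
--     return polarity
-- ===== SOURCE B (Python) =====
-- _INTENSIFIERS_STRONG = {"much", "way", "very", "really", "lots", "tons"}
--
-- _LESS_WORDS = {"less", "reduce", "reduced", "fewer", "drop", "remove", "without", "no", "kill"}
--
-- _MORE_WORDS = {"more", "increase", "boost", "extra", "add", "enhance", "with"}
--
--
-- def _polarity(window):
--     # last polarity word wins, so scan from the end and stop at the first hit
--     for w in reversed(window):
--         wl = w.lower()
--         if wl in _LESS_WORDS:
--             return -1
--         if wl in _MORE_WORDS:
--             return 1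
--     return 1
--
--
-- def _classify_intensity(window: list[str]) -> int:
--     strong = any(w.lower() in _INTENSIFIERS_STRONG for w in window)
--     polarity = _polarity(window)
--     return polarity * 2 if strong else polarity
-- ===== Notes on version B (the rewrite author's own statement) =====
-- stated objective: simpler
-- what changed: Replaces the single stateful forward loop (polarity/strong/weak accumulators) with two independent passes: an any() membership test for a strong intensifier and a reversed early-exit scan for the last polarity word; the weak state is dropped since it never affects the result.
import Mathlib
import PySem

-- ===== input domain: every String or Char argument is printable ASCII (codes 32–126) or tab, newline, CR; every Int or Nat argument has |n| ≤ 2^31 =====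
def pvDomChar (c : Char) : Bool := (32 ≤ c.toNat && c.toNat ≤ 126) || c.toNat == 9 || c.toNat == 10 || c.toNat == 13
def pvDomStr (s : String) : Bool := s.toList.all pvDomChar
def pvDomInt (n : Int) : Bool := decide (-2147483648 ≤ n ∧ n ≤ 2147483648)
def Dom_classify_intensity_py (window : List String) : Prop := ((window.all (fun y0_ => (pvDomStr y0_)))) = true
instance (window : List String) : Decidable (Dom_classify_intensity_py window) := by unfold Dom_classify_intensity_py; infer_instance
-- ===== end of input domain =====

-- B replaces A's single stateful loop by an any() strong-test plus a reversed
-- early-exit polarity scan (the dead 'weak' state is dropped); objective: simpler.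

-- ===== PORT A =====
def pvStrongWords : List String := ["much", "way", "very", "really", "lots", "tons"]
def pvWeakWords : List String := ["slightly", "little", "bit", "tad", "touch", "somewhat", "kinda", "kind"]
def pvLessWords : List String := ["less", "reduce", "reduced", "fewer", "drop", "remove", "without", "no", "kill"]
def pvMoreWords : List String := ["more", "increase", "boost", "extra", "add", "enhance", "with"]

def pvStepA (s : Int × Bool × Bool) (w : String) : Int × Bool × Bool :=
  let wl := PySem.Str.lower w
  if pvLessWords.contains wl then (-1, s.2.1, s.2.2)
  else if pvMoreWords.contains wl then (1, s.2.1, s.2.2)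
  else if pvStrongWords.contains wl then (s.1, true, s.2.2)
  else if pvWeakWords.contains wl then (s.1, s.2.1, true)
  else s

def classify_intensity_py (window : List String) : Int :=
  let st := window.foldl pvStepA (1, false, false)
  if st.2.1 then st.1 * 2
  else if st.2.2 then st.1
  else st.1

-- ===== PORT B =====
-- reversed early-exit scan for the last polarity word (default +1)
def pvPolarityRev : List String → Int
  | [] => 1
  | w :: rest =>
    let wl := PySem.Str.lower w
    if pvLessWords.contains wl then -1
    else if pvMoreWords.contains wl then 1
    else pvPolarityRev rest

def classify_intensity_py_alt (window : List String) : Int :=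
  let strong := window.any (fun w => pvStrongWords.contains (PySem.Str.lower w))
  let polarity := pvPolarityRev window.reverse
  if strong then polarity * 2 else polarity

-- ===== PRECONDITION & SPEC =====
def Spec_classify_intensity_py (window : List String) (out : Int) : Prop := out = classify_intensity_py_alt window
instance (window : List String) (out : Int) : Decidable (Spec_classify_intensity_py window out) := by unfold Spec_classify_intensity_py; infer_instance

-- ===== CLAIM (what is proved, stated in full; the proofs are below) =====
def Claim_equal_classify_intensity_py : Prop := ∀ (window : List String), Dom_classify_intensity_py window → Spec_classify_intensity_py window (classify_intensity_py window)

-- ===== LEMMAS AND PROOFS =====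

-- polarity step of A's loop body (the strong/weak branches leave polarity unchanged)
def pvPolStep (w : String) (p : Int) : Int :=
  let wl := PySem.Str.lower w
  if pvLessWords.contains wl then -1
  else if pvMoreWords.contains wl then 1
  else p

-- reversed scan with an explicit default
def pvPolRevD : List String → Int → Int
  | [], p => p
  | w :: rest, p =>
    let wl := PySem.Str.lower w
    if pvLessWords.contains wl then -1
    else if pvMoreWords.contains wl then 1
    else pvPolRevD rest p

def pvFoldPol : List String → Int → Int
  | [], p => p
  | w :: l, p => pvFoldPol l (pvPolStep w p)

def pvFoldStrong : List String → Bool → Bool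
  | [], s => s
  | w :: l, s =>
    let wl := PySem.Str.lower w
    pvFoldStrong l (if pvLessWords.contains wl then s
      else if pvMoreWords.contains wl then s
      else if pvStrongWords.contains wl then true
      else s)

theorem pv_less_not_strong (s : String) (h : s ∈ pvLessWords) : s ∉ pvStrongWords := by
  simp [pvLessWords] at h
  rcases h with rfl|rfl|rfl|rfl|rfl|rfl|rfl|rfl|rfl <;> decide

theorem pv_more_not_strong (s : String) (h : s ∈ pvMoreWords) : s ∉ pvStrongWords := by
  simp [pvMoreWords] at h
  rcases h with rfl|rfl|rfl|rfl|rfl|rfl|rfl <;> decide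

theorem pv_foldl_fst (l : List String) : ∀ (p : Int) (s w : Bool),
    (l.foldl pvStepA (p, s, w)).1 = pvFoldPol l p := by
  induction l with
  | nil => intro p s w; simp [pvFoldPol]
  | cons x l ih =>
    intro p s w
    by_cases hl : PySem.Str.lower x ∈ pvLessWords <;>
      by_cases hm : PySem.Str.lower x ∈ pvMoreWords <;>
      by_cases hs : PySem.Str.lower x ∈ pvStrongWords <;>
      by_cases hw : PySem.Str.lower x ∈ pvWeakWords <;>
      simp [pvStepA, pvPolStep, pvFoldPol, hl, hm, hs, hw, ih]

theorem pv_foldl_strong (l : List String) : ∀ (p : Int) (s w : Bool),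
    (l.foldl pvStepA (p, s, w)).2.1 = pvFoldStrong l s := by
  induction l with
  | nil => intro p s w; simp [pvFoldStrong]
  | cons x l ih =>
    intro p s w
    by_cases hl : PySem.Str.lower x ∈ pvLessWords <;>
      by_cases hm : PySem.Str.lower x ∈ pvMoreWords <;>
      by_cases hs : PySem.Str.lower x ∈ pvStrongWords <;>
      by_cases hw : PySem.Str.lower x ∈ pvWeakWords <;>
      simp [pvStepA, pvFoldStrong, hl, hm, hs, hw, ih]

theorem pv_foldStrong_eq (l : List String) : ∀ (s : Bool),
    pvFoldStrong l s = (s || l.any (fun w => pvStrongWords.contains (PySem.Str.lower w))) := by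
  induction l with
  | nil => intro s; simp [pvFoldStrong]
  | cons x l ih =>
    intro s
    by_cases hl : PySem.Str.lower x ∈ pvLessWords
    · simp [pvFoldStrong, hl, pv_less_not_strong _ hl, ih]
    · by_cases hm : PySem.Str.lower x ∈ pvMoreWords
      · simp [pvFoldStrong, hl, hm, pv_more_not_strong _ hm, ih]
      · by_cases hs : PySem.Str.lower x ∈ pvStrongWords
        · simp [pvFoldStrong, hl, hm, hs, ih]
        · simp [pvFoldStrong, hl, hm, hs, ih]

theorem pv_polRevD_append (w : String) : ∀ (r : List String) (p : Int),
    pvPolRevD (r ++ [w]) p = pvPolRevD r (pvPolStep w p) := by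
  intro r
  induction r with
  | nil => intro p; simp [pvPolRevD, pvPolStep]
  | cons x r ih =>
    intro p
    simp only [List.cons_append, pvPolRevD, ih]

theorem pv_foldPol_eq (l : List String) : ∀ (p : Int),
    pvFoldPol l p = pvPolRevD l.reverse p := by
  induction l with
  | nil => intro p; simp [pvFoldPol, pvPolRevD]
  | cons x l ih =>
    intro p
    simp only [pvFoldPol, List.reverse_cons, pv_polRevD_append, ih]

theorem pv_polarityRev_eq (l : List String) : pvPolarityRev l = pvPolRevD l 1 := by
  induction l with
  | nil => rfl
  | cons x l ih => simp only [pvPolarityRev, pvPolRevD, ih]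

-- ===== VERDICT (by name: the statement is the Claim_ definition above) =====
theorem classify_intensity_py_spec : Claim_equal_classify_intensity_py := by
  intro window _
  unfold Spec_classify_intensity_py classify_intensity_py classify_intensity_py_alt
  simp only [pv_foldl_fst, pv_foldl_strong, pv_foldStrong_eq, pv_foldPol_eq,
    pv_polarityRev_eq, Bool.false_or]
  split_ifs <;> rfl
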